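-- pv_equiv track=rewrite | github.com/jaaamessszzz/dnassembly | dnassembly/reactions/PartDesigner/GGfrag.py | _split_seq_byCase
-- ===== SOURCE A (Python) =====
-- def _split_seq_byCase(seq):
--     pieces = []
--     leftIndex = 0
--     rightIndex = len(seq)
--     for index in range (len(seq)-1):
--         if seq[index].isupper() != seq[index+1].isupper():
--             rightIndex = index + 1
--             pieces.append(seq[leftIndex:rightIndex])
--             leftIndex = index + 1
--     rightIndex = len(seq)
--     pieces.append(seq[leftIndex:rightIndex])
--     return pieces
-- ===== SOURCE B (Python) =====
-- def _split_seq_byCase(seq):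
--     # Scan run-by-run: each outer step grabs one maximal same-case run directly.
--     pieces = []
--     i = 0
--     n = len(seq)
--     while i < n:
--         j = i + 1
--         while j < n and seq[j].isupper() == seq[i].isupper():
--             j += 1
--         pieces.append(seq[i:j])
--         i = j
--     return pieces or ['']
-- ===== Notes on version B (the rewrite author's own statement) =====
-- stated objective: simpler
-- what changed: B extracts maximal same-case runs directly with a two-level scan (inner loop advances to the end of the current run), instead of A's single index loop comparing adjacent characters while tracking leftIndex/rightIndex slice bounds.
import Mathlib
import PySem

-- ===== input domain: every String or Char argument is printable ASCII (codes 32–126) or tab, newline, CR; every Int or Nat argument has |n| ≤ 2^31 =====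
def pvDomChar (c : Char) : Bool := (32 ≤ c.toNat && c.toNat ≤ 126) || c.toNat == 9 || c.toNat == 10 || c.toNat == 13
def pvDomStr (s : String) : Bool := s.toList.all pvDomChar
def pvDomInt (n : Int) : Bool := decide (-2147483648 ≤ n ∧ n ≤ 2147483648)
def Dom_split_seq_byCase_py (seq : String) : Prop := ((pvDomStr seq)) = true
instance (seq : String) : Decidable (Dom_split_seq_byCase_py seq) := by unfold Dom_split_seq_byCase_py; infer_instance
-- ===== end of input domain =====

-- B replaces A's adjacent-pair comparison loop with slice bookkeeping by a direct
-- maximal-run scan (simpler); return values are proved equal on all inputs.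

-- ===== PORT A =====
-- loop body of A's `for index in range(len(seq)-1)`; state = (pieces, leftIndex).
-- seq[a:b] with 0 ≤ a ≤ b ≤ len is (l.drop a).take (b - a) (exact: all of A's slices are in range).
def pvStepA (l : List Char) (st : List (List Char) × Nat) (index : Nat) : List (List Char) × Nat :=
  if PySem.Chars.isupper (l.getD index ' ') ≠ PySem.Chars.isupper (l.getD (index + 1) ' ')
  then (st.1 ++ [(l.drop st.2).take (index + 1 - st.2)], index + 1)
  else st

def split_seq_byCase_py (seq : String) : List String :=
  let l := seq.toList
  let n := l.length
  let st := (List.range (n - 1)).foldl (pvStepA l) ([], 0)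
  ((st.1 ++ [(l.drop st.2).take (n - st.2)]).map (fun cs => String.mk cs))

-- ===== PORT B =====
-- Source B's outer while loop: each step takes one maximal run of same-case characters
-- (the inner `while j < n and seq[j].isupper() == seq[i].isupper()` = takeWhile/dropWhile).
def pvRuns (l : List Char) : List (List Char) :=
  match l with
  | [] => []
  | c :: cs =>
      (c :: cs.takeWhile (fun x => PySem.Chars.isupper x == PySem.Chars.isupper c))
        :: pvRuns (cs.dropWhile (fun x => PySem.Chars.isupper x == PySem.Chars.isupper c))
termination_by l.length
decreasing_by
  simp only [List.length_cons]
  exact Nat.lt_succ_of_le (cs.length_dropWhile_le _)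

def split_seq_byCase_py_alt (seq : String) : List String :=
  let ps := (pvRuns seq.toList).map (fun cs => String.mk cs)
  if ps.isEmpty then [""] else ps

-- ===== PRECONDITION & SPEC =====
def Spec_split_seq_byCase_py (seq : String) (out : List String) : Prop := out = split_seq_byCase_py_alt seq
instance (seq : String) (out : List String) : Decidable (Spec_split_seq_byCase_py seq out) := by unfold Spec_split_seq_byCase_py; infer_instance

-- ===== CLAIM (what is proved, stated in full; the proofs are below) =====
def Claim_equal_split_seq_byCase_py : Prop := ∀ (seq : String), Dom_split_seq_byCase_py seq → Spec_split_seq_byCase_py seq (split_seq_byCase_py seq)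

-- ===== LEMMAS AND PROOFS =====

-- takeWhile/dropWhile through a satisfying prefix up to a failing head
lemma pv_takeWhile_break (p : Char → Bool) (u : List Char) (d : Char) (v : List Char)
    (hu : ∀ x ∈ u, p x = true) (hd : p d = false) :
    (u ++ d :: v).takeWhile p = u ∧ (u ++ d :: v).dropWhile p = d :: v := by
  induction u with
  | nil => simp [hd]
  | cons a t ih =>
      have ha : p a = true := hu a (by simp)
      obtain ⟨h2, h3⟩ := ih (fun x hx => hu x (by simp [hx]))
      simp [ha, h2, h3]

-- a whole-list run is one group
lemma pvRuns_all (c : Char) (u : List Char)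
    (hu : ∀ x ∈ u, PySem.Chars.isupper x = PySem.Chars.isupper c) :
    pvRuns (c :: u) = [c :: u] := by
  have hu' : ∀ x ∈ u, (PySem.Chars.isupper x == PySem.Chars.isupper c) = true := by
    intro x hx; simp [hu x hx]
  rw [pvRuns]
  rw [List.takeWhile_eq_self_iff.mpr hu', List.dropWhile_eq_nil_iff.mpr (fun x hx => hu' x hx)]
  rw [pvRuns]

-- a run followed by a case break splits off as one group
lemma pvRuns_break (c d : Char) (u v : List Char)
    (hu : ∀ x ∈ u, PySem.Chars.isupper x = PySem.Chars.isupper c)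
    (hd : PySem.Chars.isupper d ≠ PySem.Chars.isupper c) :
    pvRuns (c :: (u ++ d :: v)) = (c :: u) :: pvRuns (d :: v) := by
  have hu' : ∀ x ∈ u, (PySem.Chars.isupper x == PySem.Chars.isupper c) = true := by
    intro x hx; simp [hu x hx]
  have hd' : (PySem.Chars.isupper d == PySem.Chars.isupper c) = false := by
    simp [hd]
  obtain ⟨h2, h3⟩ := pv_takeWhile_break _ u d v hu' hd'
  rw [pvRuns, h2, h3]

-- main loop invariant: from index i with current run starting at `left`
-- (all characters in positions [left, i] share one case), finishing A's loop
-- produces exactly the runs of l.drop left appended to the pieces so far.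
lemma pv_loop_eq (l : List Char) :
    ∀ (m i left : Nat) (pieces : List (List Char)),
      i + m + 1 = l.length → left ≤ i →
      (∀ j, left ≤ j → j ≤ i →
        PySem.Chars.isupper (l.getD j ' ') = PySem.Chars.isupper (l.getD left ' ')) →
      (((List.range' i m).foldl (pvStepA l) (pieces, left)).1
        ++ [(l.drop ((List.range' i m).foldl (pvStepA l) (pieces, left)).2).take
              (l.length - ((List.range' i m).foldl (pvStepA l) (pieces, left)).2)])
        = pieces ++ pvRuns (l.drop left) := by
  intro m
  induction m with
  | zero =>
      intro i left pieces hn hle hinv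
      simp only [List.range'_zero, List.foldl_nil]
      have hleft : left < l.length := by omega
      have hdrop : l.drop left = l[left] :: l.drop (left + 1) := by
        exact (List.getElem_cons_drop_succ_eq_drop (h := hleft)).symm
      have hlen : (l.drop left).length = l.length - left := List.length_drop ..
      have htake : (l.drop left).take (l.length - left) = l.drop left := by
        rw [← hlen]; exact List.take_length ..
      rw [htake, hdrop]
      rw [pvRuns_all]
      intro x hx
      obtain ⟨j, hj, hx⟩ := List.mem_iff_getElem.mp hx
      have hjl : left + 1 + j < l.length := by
        have := List.length_drop (l := l) (i := left + 1); omega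
      have hx' : x = l[left + 1 + j] := by
        rw [← hx, List.getElem_drop]
      have h1 := hinv (left + 1 + j) (by omega) (by omega)
      have h2 := hinv left le_rfl hle
      rw [hx', ← List.getD_eq_getElem l ' ' hjl,
          show l[left] = l.getD left ' ' from (List.getD_eq_getElem l ' ' hleft).symm]
      rw [h1]
  | succ m ih =>
      intro i left pieces hn hle hinv
      have hi1 : i + 1 < l.length := by omega
      have hi : i < l.length := by omega
      have hleft : left < l.length := by omega
      rw [List.range'_succ, List.foldl_cons]
      by_cases hc : PySem.Chars.isupper (l.getD i ' ') ≠ PySem.Chars.isupper (l.getD (i+1) ' ')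
      · -- case break at i/i+1: a piece is appended, left moves to i+1
        have hstep : pvStepA l (pieces, left) i
            = (pieces ++ [(l.drop left).take (i + 1 - left)], i + 1) := by
          simp only [pvStepA]; rw [if_pos hc]
        rw [hstep]
        have ih' := ih (i+1) (i+1) (pieces ++ [(l.drop left).take (i + 1 - left)])
          (by omega) le_rfl (by intro j h1 h2; rw [Nat.le_antisymm h2 h1])
        rw [ih', List.append_assoc]
        congr 1
        -- pvRuns (l.drop left) = (l.drop left).take (i+1-left) :: pvRuns (l.drop (i+1))
        have hdropL : l.drop left = l[left] :: l.drop (left + 1) :=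
          (List.getElem_cons_drop_succ_eq_drop (h := hleft)).symm
        have hdropI : l.drop (i+1) = l[i+1] :: l.drop (i + 2) :=
          (List.getElem_cons_drop_succ_eq_drop (h := hi1)).symm
        set u := (l.drop (left + 1)).take (i - left) with hu_def
        have hsplit : l.drop (left + 1) = u ++ l.drop (i + 1) := by
          rw [hu_def]
          conv_lhs => rw [← List.take_append_drop (i - left) (l.drop (left + 1))]
          congr 1
          rw [List.drop_drop]
          congr 1
          omega
        have hcu : ∀ x ∈ u, PySem.Chars.isupper x = PySem.Chars.isupper l[left] := by
          intro x hx
          have hx' := List.mem_of_mem_take hx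
          obtain ⟨j, hj, hxj⟩ := List.mem_iff_getElem.mp hx
          have hul : u.length ≤ i - left := by
            rw [hu_def]; exact List.length_take_le ..
          have hjlen : j < i - left := by omega
          have hjl : left + 1 + j < l.length := by omega
          have hxval : x = l[left + 1 + j] := by
            rw [← hxj, List.getElem_take, List.getElem_drop]
          have h1 := hinv (left + 1 + j) (by omega) (by omega)
          rw [hxval, ← List.getD_eq_getElem l ' ' hjl,
              show l[left] = l.getD left ' ' from (List.getD_eq_getElem l ' ' hleft).symm]
          exact h1
        have hcd : PySem.Chars.isupper l[i+1] ≠ PySem.Chars.isupper l[left] := by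
          have h1 := hinv i hle le_rfl
          rw [← List.getD_eq_getElem l ' ' hi1,
              show l[left] = l.getD left ' ' from (List.getD_eq_getElem l ' ' hleft).symm]
          intro h; exact hc (by rw [h1, h])
        have htk : (l.drop left).take (i + 1 - left) = l[left] :: u := by
          rw [hdropL, show i + 1 - left = (i - left) + 1 by omega, List.take_succ_cons, hu_def]
        rw [htk, hdropL, hsplit, hdropI]
        exact (pvRuns_break l[left] l[i+1] u (l.drop (i+2)) hcu hcd).symm
      · -- same case: state unchanged, the run extends to i+1
        have hstep : pvStepA l (pieces, left) i = (pieces, left) := by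
          simp only [pvStepA, if_neg hc]
        rw [hstep]
        refine ih (i+1) left pieces (by omega) (by omega) ?_
        intro j h1 h2
        rcases Nat.lt_or_ge j (i+1) with h | h
        · exact hinv j h1 (by omega)
        · have : j = i + 1 := by omega
          rw [this]
          have := hinv i hle le_rfl
          rw [not_not] at hc
          rw [← hc]; exact this
  
-- ===== VERDICT (by name: the statement is the Claim_ definition above) =====
theorem split_seq_byCase_py_spec : Claim_equal_split_seq_byCase_py := by
  intro seq _
  unfold Spec_split_seq_byCase_py split_seq_byCase_py split_seq_byCase_py_alt
  cases hl : seq.toList with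
  | nil =>
      simp [pvRuns]
      rfl
  | cons c cs =>
      have hlen : (c :: cs).length = cs.length + 1 := rfl
      have h := pv_loop_eq (c :: cs) (cs.length) 0 0 []
        (by simp) le_rfl (by intro j h1 h2; rw [Nat.le_antisymm h2 h1])
      simp only [hl]
      rw [show (c :: cs).length - 1 = cs.length by simp, List.range_eq_range']
      simp only [List.drop_zero] at h
      rw [h]
      have hne : pvRuns (c :: cs) ≠ [] := by rw [pvRuns]; simp
      simp only [List.nil_append]
      rw [List.isEmpty_eq_false_iff ..|>.mpr (by simpa using hne)]
      simp
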